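-- pv_equiv track=rewrite | github.com/chumingi/Baekjoon | LECTURE/joonlab/sec01_자료구조/sec01_03_딕셔너리/j_01_03_02_1088_학생_이름_출현_횟수.py | solution
-- ===== SOURCE A (Python) =====
-- def solution(S):
--     # D: {key=학생이름, value=출현횟수} 형태의 딕셔너리
--     # S에 저장된 학생 이름을 순서대로 처리하면서 D를 만든다.
--     D = {}
--     for s in S.split():
--         if s in D:
--             D[s] += 1
--         else:
--             D[s] = 1
--
--     # answer: [학생이름, 출현횟수]를 원소로 갖는 1차원 배열
--     # 학생 이름 기준으로 오름차순으로 정렬한다.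
--     answer = list(D.items())
--     answer.sort(key=lambda x: x[0])
--     return answer
-- ===== SOURCE B (Python) =====
-- def solution(S):
--     # Sort-then-group: sort the words, then recursively peel off each run of
--     # equal consecutive names; no dict is maintained and no final sort is needed.
--     def group(ws):
--         if not ws:
--             return []
--         x = ws[0]
--         i = 1
--         while i < len(ws) and ws[i] == x:
--             i += 1
--         return [(x, i)] + group(ws[i:])
--     return group(sorted(S.split()))
-- ===== Notes on version B (the rewrite author's own statement) =====
-- stated objective: alternative
-- what changed: Replaces A's dict-counting pass plus final sort with the sort-then-group idiom: sort the words once, then recursively peel off each run of equal consecutive names, so no dictionary is built and the output needs no sorting.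
import Mathlib
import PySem

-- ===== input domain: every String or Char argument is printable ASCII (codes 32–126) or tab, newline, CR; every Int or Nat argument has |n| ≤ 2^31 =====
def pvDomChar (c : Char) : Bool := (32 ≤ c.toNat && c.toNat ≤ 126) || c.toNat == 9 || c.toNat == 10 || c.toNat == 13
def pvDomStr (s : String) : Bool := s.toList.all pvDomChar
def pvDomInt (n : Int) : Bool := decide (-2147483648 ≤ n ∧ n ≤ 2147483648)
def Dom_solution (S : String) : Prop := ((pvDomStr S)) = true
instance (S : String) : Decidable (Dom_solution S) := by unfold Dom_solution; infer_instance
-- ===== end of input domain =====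

-- B replaces the dict-counting pass plus final sort by the sort-then-group idiom
-- (sort the words, then peel off runs of equal consecutive names); alternative decomposition.

-- ===== PORT A =====
-- A: build an insertion-ordered dict of counts over S.split(), then sort its items by name.
def solution (S : String) : List (String × Int) :=
  let D := (PySem.Str.split₀ S).foldl
    (fun d s => if d.contains s then d.insert s (d.getD s 0 + 1) else d.insert s 1)
    PySem.Dict.empty
  PySem.List.sorted D.items (fun x => x.1)

-- ===== PORT B =====
-- B's recursive `group`: peel the run of the first word off the sorted word list.
def pvGroup : List String → List (String × Int)
  | [] => []
  | x :: t =>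
      (x, ((1 + (t.takeWhile (fun y => y == x)).length : Nat) : Int)) ::
        pvGroup (t.dropWhile (fun y => y == x))
termination_by l => l.length
decreasing_by
  simpa using Nat.lt_succ_of_le (List.Sublist.length_le (List.dropWhile_sublist _))

def solution_alt (S : String) : List (String × Int) :=
  pvGroup (PySem.List.sorted (PySem.Str.split₀ S) (fun x => x))

-- ===== PRECONDITION & SPEC =====
def Spec_solution (S : String) (out : List (String × Int)) : Prop := out = solution_alt S
instance (S : String) (out : List (String × Int)) : Decidable (Spec_solution S out) := by
  unfold Spec_solution; infer_instance

-- ===== CLAIM (what is proved, stated in full; the proofs are below) =====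
def Claim_equal_solution : Prop := ∀ (S : String), Dom_solution S → Spec_solution S (solution S)

-- ===== LEMMAS AND PROOFS =====

lemma pv_getD_zero_of_not_contains (d : PySem.Dict String Int) (s : String)
    (h : d.contains s = false) : d.getD s 0 = 0 := by
  rw [PySem.Dict.contains_eq_isSome_get?] at h
  unfold PySem.Dict.getD
  cases hg : d.get? s <;> simp [hg] at h ⊢

-- A's counting loop builds exactly Counter(words).
lemma pv_loop_eq_counter (ws : List String) :
    ws.foldl
      (fun d s => if d.contains s then d.insert s (d.getD s 0 + 1) else d.insert s 1)
      PySem.Dict.empty = PySem.Dict.counter ws := by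
  rw [PySem.List.foldl_congr_mem _ _ (fun d s => d.insert s (d.getD s 0 + 1)) _ ?_]
  · exact PySem.Dict.foldl_insert_getD_add_one_eq_counter ws
  · intro d s _
    by_cases h : d.contains s = true
    · simp [h]
    · simp [eq_false_of_ne_true h, pv_getD_zero_of_not_contains d s (eq_false_of_ne_true h)]

lemma pv_dedup_sublist {α : Type} [BEq α] [LawfulBEq α] (l : List α) :
    (PySem.List.dedup l).Sublist l := by
  induction l with
  | nil => simp [PySem.List.dedup]
  | cons x t ih =>
      rw [PySem.List.dedup_eq_ofList, PySem.Set.ofList_cons]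
      have h1 : ((PySem.Set.ofList t).discard x).Sublist (PySem.Set.ofList t) := by
        unfold PySem.Set.discard; exact List.filter_sublist
      have h2 : (PySem.Set.ofList t).Sublist t := by
        rw [← PySem.List.dedup_eq_ofList]; exact ih
      exact List.Sublist.cons₂ x (h1.trans h2)

lemma pv_discard_of_not_mem {α : Type} [BEq α] [LawfulBEq α] (s : PySem.Set α) (x : α)
    (h : x ∉ s) : s.discard x = s := by
  unfold PySem.Set.discard
  refine List.filter_eq_self.2 (fun a ha => ?_)
  have : a ≠ x := fun hax => h (hax ▸ ha)
  simp [this]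

-- dedup of a run of x's followed by an x-free tail
lemma pv_dedup_run {α : Type} [BEq α] [LawfulBEq α] (x : α) :
    ∀ (run rest : List α), (∀ y ∈ run, y = x) →
      PySem.Set.discard (PySem.List.dedup (run ++ rest)) x
        = PySem.Set.discard (PySem.List.dedup rest) x := by
  intro run
  induction run with
  | nil => intro rest _; rfl
  | cons y run ih =>
      intro rest hall
      have hy : y = x := hall y (by simp)
      subst hy
      rw [List.cons_append, PySem.List.dedup_eq_ofList, PySem.Set.ofList_cons,
        ← PySem.List.dedup_eq_ofList]
      unfold PySem.Set.discard
      rw [List.filter_cons_of_neg (by simp)]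
      rw [List.filter_filter]
      have hcongr : (PySem.List.dedup (run ++ rest)).filter
          (fun a => ((!a == y) && (!a == y) : Bool)) =
          (PySem.List.dedup (run ++ rest)).filter (fun a => (!a == y : Bool)) := by
        apply List.filter_congr; intro a _; simp [Bool.and_self]
      rw [hcongr]
      exact ih rest (fun z hz => hall z (by simp [hz]))

-- every element after the head of a sorted list's dropWhile-run is strictly above the head
lemma pv_rest_gt (x : String) (t : List String) (hp : (x :: t).Pairwise (· ≤ ·)) :
    ∀ y ∈ t.dropWhile (fun y => y == x), x < y := by
  have hle : ∀ y ∈ t, x ≤ y := (List.pairwise_cons.1 hp).1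
  have hpt : t.Pairwise (· ≤ ·) := (List.pairwise_cons.1 hp).2
  have hrest : (t.dropWhile (fun y => y == x)).Pairwise (· ≤ ·) :=
    hpt.sublist (List.dropWhile_sublist _)
  intro y hy
  cases hr : t.dropWhile (fun y => y == x) with
  | nil => simp [hr] at hy
  | cons h₀ tl =>
      have hh₀ : (h₀ == x) = false := by
        have := List.head_dropWhile_not (fun y => y == x) (l := t) (by simp [hr])
        simpa [hr] using this
      have hxh₀ : x < h₀ := by
        have hmem : h₀ ∈ t := List.Sublist.mem (by rw [hr]; simp) (List.dropWhile_sublist _)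
        rcases lt_or_eq_of_le (hle h₀ hmem) with h | h
        · exact h
        · subst h; simp at hh₀
      rw [hr] at hy
      rcases List.mem_cons.1 hy with rfl | hy'
      · exact hxh₀
      · have : h₀ ≤ y := (List.rel_of_pairwise_cons (hr ▸ hrest)) hy'
        exact lt_of_lt_of_le hxh₀ this

-- characterization of B's grouping pass on a sorted list
lemma pv_group_spec : ∀ (l : List String), l.Pairwise (· ≤ ·) →
    pvGroup l = (PySem.List.dedup l).map (fun k => (k, (l.count k : Int))) := by
  intro l
  induction l using pvGroup.induct with
  | case1 => intro _; simp [pvGroup, PySem.List.dedup]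
  | case2 x t ih =>
      intro hp
      set run := t.takeWhile (fun y => y == x) with hrun
      set rest := t.dropWhile (fun y => y == x) with hrest
      have hsplit : run ++ rest = t := List.takeWhile_append_dropWhile
      have hall : ∀ y ∈ run, y = x := by
        intro y hy
        simpa using List.mem_takeWhile_imp hy
      have hgt : ∀ y ∈ rest, x < y := pv_rest_gt x t hp
      have hxrest : x ∉ rest := fun hx => lt_irrefl x (hgt x hx)
      have hprest : rest.Pairwise (· ≤ ·) :=
        ((List.pairwise_cons.1 hp).2).sublist (List.dropWhile_sublist _)
      -- dedup (x :: t) = x :: dedup rest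
      have hded : PySem.List.dedup (x :: t) = x :: PySem.List.dedup rest := by
        rw [PySem.List.dedup_eq_ofList, PySem.Set.ofList_cons, ← PySem.List.dedup_eq_ofList,
          ← hsplit]
        rw [pv_dedup_run x run rest hall,
          pv_discard_of_not_mem _ _ (by rw [PySem.List.mem_dedup]; exact hxrest)]
      -- counts
      have hcrun : run.count x = run.length :=
        List.count_eq_length.2 (fun y hy => ((hall y hy) ▸ rfl))
      have hcrest : rest.count x = 0 :=
        List.count_eq_zero.2 hxrest
      have hcx : (x :: t).count x = 1 + run.length := by
        rw [← hsplit]; simp [List.count_append, hcrun, hcrest, Nat.add_comm]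
      rw [pvGroup, hded, List.map_cons, ← hrun, ← hrest, ih hprest, hcx]
      congr 1
      apply List.map_congr_left
      intro k hk
      have hkrest : k ∈ rest := (PySem.List.mem_dedup rest k).1 hk
      have hkx : k ≠ x := fun h => lt_irrefl x (h ▸ hgt k hkrest)
      have hkrun : k ∉ run := fun h => hkx (hall k h)
      have : (x :: t).count k = rest.count k := by
        rw [← hsplit]
        simp [List.count_append, List.count_eq_zero.2 hkrun, Ne.symm hkx]
      rw [this]

-- B's output is strictly increasing in the name component
lemma pv_group_pairwise (l : List String) (hp : l.Pairwise (· ≤ ·)) :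
    (pvGroup l).Pairwise (fun a b => a.1 < b.1) := by
  rw [pv_group_spec l hp]
  rw [List.pairwise_map]
  have hnd : (PySem.List.dedup l).Nodup := PySem.List.nodup_dedup l
  have hle : (PySem.List.dedup l).Pairwise (· ≤ ·) := hp.sublist (pv_dedup_sublist l)
  have := hle.and hnd
  exact this.imp (fun ⟨h1, h2⟩ => lt_of_le_of_ne h1 h2)

-- ===== VERDICT (by name: the statement is the Claim_ definition above) =====
theorem solution_spec : Claim_equal_solution := by
  intro S _
  unfold Spec_solution solution solution_alt
  simp only [pv_loop_eq_counter]
  set ws := PySem.Str.split₀ S with hws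
  have hperm : (pvGroup (PySem.List.sorted ws (fun x => x))).Perm
      (PySem.Dict.counter ws).items := by
    rw [PySem.Dict.items_counter,
      pv_group_spec _ (PySem.List.sorted_pairwise ws (fun x => x))]
    have hcnt : ∀ k, (PySem.List.sorted ws (fun x => x)).count k = ws.count k :=
      fun k => (PySem.List.sorted_perm ws (fun x => x) false).count_eq k
    have hmapeq : (PySem.List.dedup (PySem.List.sorted ws (fun x => x))).map
        (fun k => (k, ((PySem.List.sorted ws (fun x => x)).count k : Int))) =
        (PySem.List.dedup (PySem.List.sorted ws (fun x => x))).map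
        (fun k => (k, (ws.count k : Int))) := by
      apply List.map_congr_left; intro k _; rw [hcnt k]
    rw [hmapeq]
    apply List.Perm.map
    rw [List.perm_ext_iff_of_nodup
      (PySem.List.nodup_dedup _) (PySem.Set.nodup_ofList _)]
    intro a
    rw [PySem.List.mem_dedup, PySem.Set.mem_ofList, PySem.List.mem_sorted]
  exact PySem.List.sorted_eq_of_perm_of_pairwise_lt _ _ _ hperm
    (pv_group_pairwise _ (PySem.List.sorted_pairwise ws (fun x => x)))
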